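-- pv_equiv track=rewrite | github.com/avihay30/PythonProjects | Python_practices/Gidon_lab/7_practice.py | is_pairs_are_not_consecutive_numbers
-- ===== SOURCE A (Python) =====
-- def is_pairs_are_not_consecutive_numbers(num):
--     """ Function is_pairs_are_not_consecutive_numbers receives a
--         natural number, and return boolean value if every pair of digits are
--         not consecutive numbers
--     """
--     digit = num % 10
--     while num >= 10:
--         num //= 10
--         next_digit = num % 10
--         # checking if the pair is consecutive numbers.
--         if abs(digit - next_digit) == 1:
--             return False
--         digit = next_digit
--     return True
-- ===== SOURCE B (Python) =====
-- def is_pairs_are_not_consecutive_numbers(num):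
--     # Phase 1: materialize the digits (same arithmetic extraction as A).
--     digits = [num % 10]
--     while num >= 10:
--         num //= 10
--         digits.append(num % 10)
--     # Phase 2: pairwise scan over the collected digits.
--     return all(abs(a - b) != 1 for a, b in zip(digits, digits[1:]))
-- ===== Notes on version B (the rewrite author's own statement) =====
-- stated objective: alternative
-- what changed: A streams digits and early-exits inside a single while loop; B first materializes all digits into a list in one pass, then checks adjacent pairs in a separate pairwise scan.
import Mathlib
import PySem

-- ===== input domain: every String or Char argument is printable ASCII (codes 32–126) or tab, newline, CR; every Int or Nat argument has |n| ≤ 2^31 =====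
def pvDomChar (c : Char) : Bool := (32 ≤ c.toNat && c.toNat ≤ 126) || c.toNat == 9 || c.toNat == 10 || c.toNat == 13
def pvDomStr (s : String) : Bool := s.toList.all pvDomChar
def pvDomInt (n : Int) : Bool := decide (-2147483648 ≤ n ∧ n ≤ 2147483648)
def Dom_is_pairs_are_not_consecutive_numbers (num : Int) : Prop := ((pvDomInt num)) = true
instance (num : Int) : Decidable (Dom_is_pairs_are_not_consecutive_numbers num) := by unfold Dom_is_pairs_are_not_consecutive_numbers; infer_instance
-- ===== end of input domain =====

-- B materializes the digits into a list first, then checks adjacent pairs in a second pass;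
-- A streams with an early exit.  Same return value everywhere (both total).
-- ===== PORT A =====
-- A's while loop: state is (num, digit); guard num >= 10.
def pvALoop (num digit : Int) : Bool :=
  if h : num ≥ 10 then
    let num' := PySem.Int.floordiv num 10
    let next_digit := PySem.Int.mod num' 10
    if (digit - next_digit).natAbs = 1 then false
    else pvALoop num' next_digit
  else true
termination_by num.toNat
decreasing_by
  have h2 : PySem.Int.floordiv num 10 = num / 10 :=
    PySem.Int.floordiv_eq_ediv_of_pos (by omega)
  have h3 : num / 10 < num := by omega
  have h4 : 0 ≤ num / 10 := Int.ediv_nonneg (by omega) (by omega)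
  omega

def is_pairs_are_not_consecutive_numbers (num : Int) : Bool :=
  pvALoop num (PySem.Int.mod num 10)

-- ===== PORT B =====
-- Phase 1 of Source B: the digits appended by the while loop (after the initial num % 10).
def pvDigitsRest (num : Int) : List Int :=
  if h : num ≥ 10 then
    let num' := PySem.Int.floordiv num 10
    PySem.Int.mod num' 10 :: pvDigitsRest num'
  else []
termination_by num.toNat
decreasing_by
  have h2 : PySem.Int.floordiv num 10 = num / 10 :=
    PySem.Int.floordiv_eq_ediv_of_pos (by omega)
  have h3 : num / 10 < num := by omega
  have h4 : 0 ≤ num / 10 := Int.ediv_nonneg (by omega) (by omega)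
  omega

-- Phase 2 of Source B: all(abs(a-b) != 1 for a, b in zip(digits, digits[1:])).
def pvPairwiseOk : List Int → Bool
  | a :: b :: rest => ((a - b).natAbs ≠ 1) && pvPairwiseOk (b :: rest)
  | _ => true

def is_pairs_are_not_consecutive_numbers_alt (num : Int) : Bool :=
  pvPairwiseOk (PySem.Int.mod num 10 :: pvDigitsRest num)

-- ===== PRECONDITION & SPEC =====
def Spec_is_pairs_are_not_consecutive_numbers (num : Int) (out : Bool) : Prop := out = is_pairs_are_not_consecutive_numbers_alt num
instance (num : Int) (out : Bool) : Decidable (Spec_is_pairs_are_not_consecutive_numbers num out) := by unfold Spec_is_pairs_are_not_consecutive_numbers; infer_instance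

-- ===== CLAIM (what is proved, stated in full; the proofs are below) =====
def Claim_equal_is_pairs_are_not_consecutive_numbers : Prop := ∀ (num : Int), Dom_is_pairs_are_not_consecutive_numbers num → Spec_is_pairs_are_not_consecutive_numbers num (is_pairs_are_not_consecutive_numbers num)

-- ===== LEMMAS AND PROOFS =====
lemma pvALoop_eq_pairwise (num digit : Int) :
    pvALoop num digit = pvPairwiseOk (digit :: pvDigitsRest num) := by
  fun_induction pvALoop num digit with
  | case1 num digit h num' nd hEq =>
    rw [pvDigitsRest, dif_pos h]
    show false = pvPairwiseOk (digit :: nd :: pvDigitsRest num')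
    simp [pvPairwiseOk, hEq]
  | case2 num digit h num' nd hNe ih =>
    rw [pvDigitsRest, dif_pos h]
    show pvALoop num' nd = pvPairwiseOk (digit :: nd :: pvDigitsRest num')
    rw [ih, pvPairwiseOk]
    simp [hNe]
  | case3 num digit h =>
    rw [pvDigitsRest, dif_neg h]
    rfl

-- ===== VERDICT (by name: the statement is the Claim_ definition above) =====
theorem is_pairs_are_not_consecutive_numbers_spec : Claim_equal_is_pairs_are_not_consecutive_numbers := by
  intro num _
  unfold Spec_is_pairs_are_not_consecutive_numbers
  unfold is_pairs_are_not_consecutive_numbers is_pairs_are_not_consecutive_numbers_alt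
  exact pvALoop_eq_pairwise _ _
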